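-- pv_equiv track=rewrite | github.com/Aasthaengg/IBMdataset | Python_codes/p03488/s858098931.py | check
-- ===== SOURCE A (Python) =====
-- def check(arr, x):
--     pos = set([0])
--     for dx in arr:
--         npos = set()
--         for p in pos:
--             npos.add(p+dx)
--             npos.add(p-dx)
--         pos = npos
--     return x in pos
-- ===== SOURCE B (Python) =====
-- def check(arr, x):
--     # x is reachable iff x = total - 2*s for some subset sum s of arr
--     total = sum(arr)
--     if (total - x) % 2:
--         return False
--     target = (total - x) // 2
--     sums = {0}
--     for d in arr:
--         sums |= {s + d for s in sums}
--     return target in sums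
-- ===== Notes on version B (the rewrite author's own statement) =====
-- stated objective: alternative
-- what changed: Reformulates reachability as a subset-sum problem (x = total - 2*s for a subset sum s of arr): a parity pre-check plus one monotone set of subset sums grown by a set-comprehension union per element, instead of rebuilding the whole position set with a Python-level inner loop per element.
import Mathlib
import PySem

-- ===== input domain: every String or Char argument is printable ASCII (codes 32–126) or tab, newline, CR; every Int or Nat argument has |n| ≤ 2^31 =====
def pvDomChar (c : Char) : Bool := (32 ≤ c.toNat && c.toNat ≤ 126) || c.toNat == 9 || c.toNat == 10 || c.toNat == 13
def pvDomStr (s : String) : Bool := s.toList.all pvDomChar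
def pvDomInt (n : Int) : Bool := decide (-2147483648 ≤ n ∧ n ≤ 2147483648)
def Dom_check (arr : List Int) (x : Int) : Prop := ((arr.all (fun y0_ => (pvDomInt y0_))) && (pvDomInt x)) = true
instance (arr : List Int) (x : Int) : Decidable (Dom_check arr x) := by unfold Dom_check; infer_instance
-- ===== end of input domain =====

-- B replaces A's rebuild-the-position-set BFS by a subset-sum formulation (x = total - 2*s) with a parity pre-check and one monotone set of subset sums.

-- ===== PORT A =====
-- inner loop "for p in pos: npos.add(p+dx); npos.add(p-dx)" (the set is consumed only into another set, so the result is order-independent)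
def pvStepSet (dx : Int) (pos : PySem.Set Int) : PySem.Set Int :=
  pos.foldl (fun npos p => PySem.Set.add (PySem.Set.add npos (p + dx)) (p - dx)) PySem.Set.empty

def check (arr : List Int) (x : Int) : Bool :=
  let pos : PySem.Set Int := arr.foldl (fun pos dx => pvStepSet dx pos) (PySem.Set.ofList [0])
  PySem.Set.contains pos x

-- ===== PORT B =====
def check_alt (arr : List Int) (x : Int) : Bool :=
  let total : Int := arr.sum
  if PySem.Int.mod (total - x) 2 ≠ 0 then false
  else
    let target : Int := PySem.Int.floordiv (total - x) 2
    -- "sums |= {s + d for s in sums}": the set is consumed only into another set, order-independent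
    let sums : PySem.Set Int :=
      arr.foldl (fun sums d => PySem.Set.union sums (sums.map (fun s => s + d))) (PySem.Set.ofList [0])
    PySem.Set.contains sums target

-- ===== PRECONDITION & SPEC =====
def Spec_check (arr : List Int) (x : Int) (out : Bool) : Prop := out = check_alt arr x
instance (arr : List Int) (x : Int) (out : Bool) : Decidable (Spec_check arr x out) := by unfold Spec_check; infer_instance

-- ===== CLAIM (what is proved, stated in full; the proofs are below) =====
def Claim_equal_check : Prop := ∀ (arr : List Int) (x : Int), Dom_check arr x → Spec_check arr x (check arr x)

-- ===== LEMMAS AND PROOFS =====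

theorem mem_pvStepSet (dx : Int) (pos : PySem.Set Int) (v : Int) :
    v ∈ pvStepSet dx pos ↔ ∃ p ∈ pos, v = p + dx ∨ v = p - dx := by
  unfold pvStepSet
  have h : ∀ (l : List Int) (n0 : PySem.Set Int),
      v ∈ l.foldl (fun npos p => PySem.Set.add (PySem.Set.add npos (p + dx)) (p - dx)) n0 ↔
        v ∈ n0 ∨ ∃ p ∈ l, v = p + dx ∨ v = p - dx := by
    intro l
    induction l with
    | nil => simp
    | cons q t ih =>
        intro n0
        simp only [List.foldl_cons, ih, PySem.Set.mem_add, List.mem_cons]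
        constructor
        · rintro (((h | h) | h) | ⟨p, hp, hpe⟩)
          · exact Or.inl h
          · exact Or.inr ⟨q, Or.inl rfl, Or.inl h⟩
          · exact Or.inr ⟨q, Or.inl rfl, Or.inr h⟩
          · exact Or.inr ⟨p, Or.inr hp, hpe⟩
        · rintro (h | ⟨p, (rfl | hp), hpe⟩)
          · exact Or.inl (Or.inl (Or.inl h))
          · rcases hpe with h | h
            · exact Or.inl (Or.inl (Or.inr h))
            · exact Or.inl (Or.inr h)
          · exact Or.inr ⟨p, hp, hpe⟩
  rw [h pos PySem.Set.empty]
  simp [PySem.Set.empty]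

-- invariant: positions are exactly (c + remaining sum) - 2 * (a subset sum)
theorem pvInv (l : List Int) (S T : PySem.Set Int) (c : Int)
    (h : ∀ v, v ∈ S ↔ ∃ s ∈ T, v = c - 2 * s) :
    ∀ v, v ∈ l.foldl (fun s d => pvStepSet d s) S ↔
      ∃ s ∈ l.foldl (fun sums d => PySem.Set.union sums (sums.map (fun s => s + d))) T,
        v = (c + l.sum) - 2 * s := by
  induction l generalizing S T c with
  | nil => simpa using h
  | cons d t ih =>
      simp only [List.foldl_cons, List.sum_cons]
      have hstep : ∀ v, v ∈ pvStepSet d S ↔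
          ∃ s ∈ PySem.Set.union T (T.map (fun s => s + d)), v = (c + d) - 2 * s := by
        intro v
        rw [mem_pvStepSet]
        constructor
        · rintro ⟨p, hp, hpe⟩
          rcases (h p).1 hp with ⟨s, hs, rfl⟩
          rcases hpe with rfl | rfl
          · exact ⟨s, (PySem.Set.mem_union _ _ _).2 (Or.inl hs), by ring⟩
          · refine ⟨s + d, (PySem.Set.mem_union _ _ _).2 (Or.inr ?_), by ring⟩
            exact List.mem_map.2 ⟨s, hs, rfl⟩
        · rintro ⟨s', hs', rfl⟩
          rcases (PySem.Set.mem_union _ _ _).1 hs' with hs | hs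
          · exact ⟨c - 2 * s', (h _).2 ⟨s', hs, rfl⟩, Or.inl (by ring)⟩
          · rcases List.mem_map.1 hs with ⟨s0, hs0, rfl⟩
            exact ⟨c - 2 * s0, (h _).2 ⟨s0, hs0, rfl⟩, Or.inr (by ring)⟩
      intro v
      rw [ih (pvStepSet d S) (PySem.Set.union T (T.map (fun s => s + d))) (c + d) hstep v]
      constructor <;> rintro ⟨s, hs, rfl⟩ <;> exact ⟨s, hs, by ring⟩

-- ===== VERDICT (by name: the statement is the Claim_ definition above) =====
theorem check_spec : Claim_equal_check := by
  intro arr x _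
  unfold Spec_check check check_alt
  have h0 : ∀ v : Int, v ∈ (PySem.Set.ofList [0] : PySem.Set Int) ↔
      ∃ s ∈ (PySem.Set.ofList [0] : PySem.Set Int), v = 0 - 2 * s := by
    intro v
    simp only [PySem.Set.mem_ofList, List.mem_singleton]
    constructor
    · rintro rfl; exact ⟨0, rfl, by ring⟩
    · rintro ⟨s, rfl, rfl⟩; ring
  have hpos := pvInv arr (PySem.Set.ofList [0]) (PySem.Set.ofList [0]) 0 h0 x
  rw [zero_add] at hpos
  set sums := arr.foldl (fun sums d => PySem.Set.union sums (sums.map (fun s => s + d)))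
      (PySem.Set.ofList [0]) with hsums
  rcases eq_or_ne (PySem.Int.mod (arr.sum - x) 2) 0 with hm | hm
  case inr =>
    -- parity fails: no subset sum can give x, A returns False too
    rw [if_pos hm]
    have hx : x ∉ arr.foldl (fun s d => pvStepSet d s) (PySem.Set.ofList [0]) := by
      intro hmem
      rcases hpos.1 hmem with ⟨s, _, hxe⟩
      exact hm ((PySem.Int.mod_eq_zero_iff_dvd _ _).2 ⟨s, by omega⟩)
    simp [PySem.Set.contains_eq_listContains, hx]
  case inl =>
    rw [if_neg (not_ne_iff.mpr hm)]
    obtain ⟨k, hk⟩ := (PySem.Int.mod_eq_zero_iff_dvd _ _).1 hm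
    have ht : PySem.Int.floordiv (arr.sum - x) 2 = k := by
      rw [PySem.Int.floordiv_eq_iff_of_pos (by omega)]
      omega
    rw [ht]
    have hiff : (x ∈ arr.foldl (fun s d => pvStepSet d s) (PySem.Set.ofList [0])) ↔ k ∈ sums := by
      rw [hpos]
      constructor
      · rintro ⟨s, hs, hxe⟩
        have : s = k := by omega
        exact this ▸ hs
      · intro hks
        exact ⟨k, hks, by omega⟩
    rcases Classical.em (k ∈ sums) with hk2 | hk2
    · simp [PySem.Set.contains_eq_listContains, hk2, hiff.2 hk2]
    · have hx : x ∉ arr.foldl (fun s d => pvStepSet d s) (PySem.Set.ofList [0]) :=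
        fun h => hk2 (hiff.1 h)
      simp [PySem.Set.contains_eq_listContains, hk2, hx]
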